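-- pv_equiv track=rewrite | github.com/helpfuldolphin/mathledger | backend/health/proof_snapshot_integrity_adapter.py | _sorted_failure_codes
-- ===== SOURCE A (Python) =====
-- from typing import Any, Dict, List, Optional
--
-- PROOF_SNAPSHOT_INTEGRITY_FAILURE_PRIORITY: Dict[str, int] = {
--     "MISSING_FILE": 0,
--     "SHA256_MISMATCH": 1,
--     "CANONICAL_HASH_MISMATCH": 2,
--     "ENTRY_COUNT_MISMATCH": 3,
-- }
--
-- def _sorted_failure_codes(value: Any) -> List[str]:
--     if not isinstance(value, list):
--         return []
--
--     canonical: List[str] = []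
--     for item in value:
--         if isinstance(item, str) and item in PROOF_SNAPSHOT_INTEGRITY_FAILURE_PRIORITY:
--             canonical.append(item)
--
--     unique = sorted(
--         set(canonical),
--         key=lambda code: (PROOF_SNAPSHOT_INTEGRITY_FAILURE_PRIORITY[code], code),
--     )
--     return unique
-- ===== SOURCE B (Python) =====
-- _ORDERED = ("MISSING_FILE", "SHA256_MISMATCH", "CANONICAL_HASH_MISMATCH", "ENTRY_COUNT_MISMATCH")
--
--
-- def _sorted_failure_codes(value):
--     if not isinstance(value, list):
--         return []
--     return [code for code in _ORDERED if code in value]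
-- ===== Notes on version B (the rewrite author's own statement) =====
-- stated objective: simpler
-- what changed: Instead of filtering the input, deduplicating it through a set and sorting by a (priority, code) key, B iterates once over the fixed priority-ordered tuple of the four known codes and keeps those present in the input, so no sort and no set are needed.
import Mathlib
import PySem

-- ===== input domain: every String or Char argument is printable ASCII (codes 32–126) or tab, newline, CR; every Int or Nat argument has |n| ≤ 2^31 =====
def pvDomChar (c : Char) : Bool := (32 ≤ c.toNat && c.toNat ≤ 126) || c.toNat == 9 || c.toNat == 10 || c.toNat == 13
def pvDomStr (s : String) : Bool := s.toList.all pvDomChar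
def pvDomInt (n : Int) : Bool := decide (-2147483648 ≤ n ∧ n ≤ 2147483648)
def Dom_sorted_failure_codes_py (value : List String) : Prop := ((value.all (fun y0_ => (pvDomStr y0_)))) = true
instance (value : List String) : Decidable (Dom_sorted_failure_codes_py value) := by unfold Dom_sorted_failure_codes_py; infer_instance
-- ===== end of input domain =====

-- B replaces A's filter + set + sort-by-(priority, code) with a single pass over the
-- fixed priority-ordered tuple of the four codes, keeping those present in the input (objective: simpler).

-- ===== PORT A =====
-- PROOF_SNAPSHOT_INTEGRITY_FAILURE_PRIORITY
def pvPriority : PySem.Dict String Int :=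
  ⟨[("MISSING_FILE", 0), ("SHA256_MISMATCH", 1), ("CANONICAL_HASH_MISMATCH", 2), ("ENTRY_COUNT_MISMATCH", 3)]⟩

-- `value` is typed `List String`, so `isinstance(value, list)` / `isinstance(item, str)` are always true.
-- In A's sort key, `PRIORITY[code]` is looked up only for codes appended because they are keys of the
-- dict, so the lookup never raises; `getD … 0`'s default is unreachable.
def sorted_failure_codes_py (value : List String) : List String :=
  let canonical : List String :=
    value.foldl (fun acc item =>
      if (PySem.Dict.get? pvPriority item).isSome then acc ++ [item] else acc) []
  PySem.List.sorted2 (PySem.Set.ofList canonical)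
    (fun code => PySem.Dict.getD pvPriority code 0) (fun code => code) false

-- ===== PORT B =====
-- _ORDERED
def pvOrdered : List String :=
  ["MISSING_FILE", "SHA256_MISMATCH", "CANONICAL_HASH_MISMATCH", "ENTRY_COUNT_MISMATCH"]

def sorted_failure_codes_py_alt (value : List String) : List String :=
  pvOrdered.filter (fun code => value.contains code)

-- ===== PRECONDITION & SPEC =====
def Spec_sorted_failure_codes_py (value : List String) (out : List String) : Prop := out = sorted_failure_codes_py_alt value
instance (value : List String) (out : List String) : Decidable (Spec_sorted_failure_codes_py value out) := by unfold Spec_sorted_failure_codes_py; infer_instance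

-- ===== CLAIM (what is proved, stated in full; the proofs are below) =====
def Claim_equal_sorted_failure_codes_py : Prop := ∀ (value : List String), Dom_sorted_failure_codes_py value → Spec_sorted_failure_codes_py value (sorted_failure_codes_py value)

-- ===== LEMMAS AND PROOFS =====

-- A string is a key of the priority dict iff it is one of the four ordered codes.
theorem pv_key_iff (c : String) :
    ((PySem.Dict.get? pvPriority c).isSome = true) ↔ c ∈ pvOrdered := by
  simp only [PySem.Dict.get?, Option.isSome_map, List.find?_isSome,
    pvPriority, pvOrdered, List.mem_cons, List.not_mem_nil, or_false]
  constructor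
  · rintro ⟨x, (rfl | rfl | rfl | rfl), hbeq⟩ <;> rw [beq_iff_eq] at hbeq <;> subst hbeq <;>
      first
        | exact Or.inl rfl
        | exact Or.inr (Or.inl rfl)
        | exact Or.inr (Or.inr (Or.inl rfl))
        | exact Or.inr (Or.inr (Or.inr rfl))
  · rintro (rfl | rfl | rfl | rfl)
    · exact ⟨_, Or.inl rfl, beq_self_eq_true _⟩
    · exact ⟨_, Or.inr (Or.inl rfl), beq_self_eq_true _⟩
    · exact ⟨_, Or.inr (Or.inr (Or.inl rfl)), beq_self_eq_true _⟩
    · exact ⟨_, Or.inr (Or.inr (Or.inr rfl)), beq_self_eq_true _⟩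

theorem pv_insertBy_congr {α : Type} (f g : α → α → Bool) (x : α) :
    ∀ ys : List α, (∀ y ∈ ys, f x y = g x y) →
      PySem.List.insertBy f x ys = PySem.List.insertBy g x ys := by
  intro ys
  induction ys with
  | nil => intro _; rfl
  | cons y ys ih =>
    intro h
    have hy := h y (by simp)
    simp only [PySem.List.insertBy, hy]
    split
    · rfl
    · rw [ih (fun z hz => h z (by simp [hz]))]

-- A fold of insertions is unchanged when the two comparators agree on all involved elements.
theorem pv_foldl_insertBy_congr {α : Type} (f g : α → α → Bool) (P : α → Prop)
    (hfg : ∀ a b, P a → P b → f a b = g a b) :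
    ∀ (xs acc : List α), (∀ x ∈ xs, P x) → (∀ x ∈ acc, P x) →
      xs.foldl (fun acc x => PySem.List.insertBy f x acc) acc
        = xs.foldl (fun acc x => PySem.List.insertBy g x acc) acc := by
  intro xs
  induction xs with
  | nil => intro acc _ _; rfl
  | cons x xs ih =>
    intro acc hxs hacc
    have hx : P x := hxs x (by simp)
    simp only [List.foldl_cons]
    rw [pv_insertBy_congr f g x acc (fun y hy => hfg x y hx (hacc y hy))]
    exact ih _ (fun z hz => hxs z (by simp [hz]))
      (fun z hz => by
        rcases (PySem.List.mem_insertBy g x z acc).mp hz with h | h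
        · exact h ▸ hx
        · exact hacc z h)

-- The two comparators (A's tuple key vs plain priority key) agree on the four codes:
-- the priorities are distinct there, so the code tiebreak is dead.
theorem pv_cmp_agree (a b : String) (ha : a ∈ pvOrdered) (hb : b ∈ pvOrdered) :
    (decide (PySem.Dict.getD pvPriority a 0 < PySem.Dict.getD pvPriority b 0)
        || !decide (PySem.Dict.getD pvPriority b 0 < PySem.Dict.getD pvPriority a 0)
           && decide (a < b))
    = decide (PySem.Dict.getD pvPriority a 0 < PySem.Dict.getD pvPriority b 0) := by
  have hinj : PySem.Dict.getD pvPriority a 0 = PySem.Dict.getD pvPriority b 0 → a = b := by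
    fin_cases ha <;> fin_cases hb <;> decide
  by_cases hlt : PySem.Dict.getD pvPriority a 0 < PySem.Dict.getD pvPriority b 0
  · simp [hlt]
  · by_cases hgt : PySem.Dict.getD pvPriority b 0 < PySem.Dict.getD pvPriority a 0
    · simp [hlt, hgt]
    · have hab : a = b := hinj (by omega)
      subst hab
      simp

theorem pv_ordered_pairwise :
    pvOrdered.Pairwise (fun a b =>
      PySem.Dict.getD pvPriority a 0 < PySem.Dict.getD pvPriority b 0) := by
  decide

theorem pv_main (value : List String) :
    sorted_failure_codes_py value = sorted_failure_codes_py_alt value := by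
  unfold sorted_failure_codes_py
  rw [PySem.List.foldl_append_if_eq_filter]
  simp only [List.nil_append]
  set p : String → Bool := fun item => (PySem.Dict.get? pvPriority item).isSome with hp
  set S : List String := PySem.Set.ofList (value.filter p) with hS
  have hmemS : ∀ c, c ∈ S → c ∈ pvOrdered := by
    intro c hc
    rw [hS, PySem.Set.mem_ofList, List.mem_filter] at hc
    exact (pv_key_iff c).mp hc.2
  -- A's tuple-key sort coincides with a plain priority-key sort on these elements
  have hstep : PySem.List.sorted2 S (fun code => PySem.Dict.getD pvPriority code 0)
      (fun code => code) false
      = PySem.List.sorted S (fun code => PySem.Dict.getD pvPriority code 0) false := by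
    show S.foldl (fun acc x => PySem.List.insertBy _ x acc) []
      = S.foldl (fun acc x => PySem.List.insertBy _ x acc) []
    exact pv_foldl_insertBy_congr _ _ (fun c => c ∈ pvOrdered)
      (fun a b ha hb => pv_cmp_agree a b ha hb) S []
      hmemS (by intro z hz; simp at hz)
  rw [hstep]
  -- name the sorted order: B's result is a strictly key-increasing rearrangement of S
  apply PySem.List.sorted_eq_of_perm_of_pairwise_lt
  · unfold sorted_failure_codes_py_alt
    rw [List.perm_ext_iff_of_nodup (List.Nodup.filter _ (by decide))
      (by rw [hS]; exact PySem.Set.nodup_ofList _)]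
    intro c
    rw [List.mem_filter, hS, PySem.Set.mem_ofList, List.mem_filter]
    constructor
    · rintro ⟨ho, hc⟩
      exact ⟨by simpa using hc, (pv_key_iff c).mpr ho⟩
    · rintro ⟨hc, hk⟩
      exact ⟨(pv_key_iff c).mp hk, by simpa using hc⟩
  · exact List.Pairwise.filter _ pv_ordered_pairwise

-- ===== VERDICT (by name: the statement is the Claim_ definition above) =====
theorem sorted_failure_codes_py_spec : Claim_equal_sorted_failure_codes_py := by
  intro value _
  unfold Spec_sorted_failure_codes_py
  exact pv_main value
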